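-- pv_equiv track=rewrite | github.com/ArjunRAj77/third-eye | thirdeye.py | split_by_question
-- ===== SOURCE A (Python) =====
-- def split_by_question(text):
--     """
--     Splits the text by question number (e.g., Q1:, Q2:) and returns a dictionary.
--     Assumes the format: "Q1: <answer>"
--     """
--     questions = {}
--     current_question = None
--     current_text = []
--
--     for line in text.split("\n"):
--         if line.strip():  # Process non-empty lines
--             if line.startswith("Q"):  # Detect question number
--                 if current_question:
--                     questions[current_question] = "\n".join(current_text)
--                 current_question = line.split(":")[0].strip()  # e.g., "Q1"
--                 current_text = [line.split(":")[1].strip()]  # Store the first part of the answer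
--             else:
--                 current_text.append(line.strip())  # Add remaining lines of the answer
--
--     # Add the last question
--     if current_question:
--         questions[current_question] = "\n".join(current_text)
--
--     return questions
-- ===== SOURCE B (Python) =====
-- def split_by_question(text):
--     # Two-phase rewrite: filter non-empty lines, group them at Q-headers by
--     # index scanning, then build each dict entry from its whole group at once.
--     lines = [ln for ln in text.split("\n") if ln.strip()]
--     result = {}
--     i = 0
--     n = len(lines)
--     while i < n:
--         if not lines[i].startswith("Q"):
--             i += 1  # line before the first question: dropped
--             continue
--         j = i + 1
--         while j < n and not lines[j].startswith("Q"):
--             j += 1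
--         head = lines[i]
--         key = head.split(":")[0].strip()
--         body = [head.split(":")[1].strip()] + [ln.strip() for ln in lines[i + 1:j]]
--         result[key] = "\n".join(body)
--         i = j
--     return result
-- ===== Notes on version B (the rewrite author's own statement) =====
-- stated objective: alternative
-- what changed: A's single-pass state machine (current_question/current_text accumulators flushed into the dict at each next Q-line) is replaced by a two-phase index scan: filter the non-empty lines, locate each Q-header and the extent of its group with an inner scan (takeWhile/dropWhile in the port), then build each dict entry from its whole group at once.
-- outside the precondition, e.g. on split_by_question('Q'): A raises IndexError, B raises IndexError
import Mathlib
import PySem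

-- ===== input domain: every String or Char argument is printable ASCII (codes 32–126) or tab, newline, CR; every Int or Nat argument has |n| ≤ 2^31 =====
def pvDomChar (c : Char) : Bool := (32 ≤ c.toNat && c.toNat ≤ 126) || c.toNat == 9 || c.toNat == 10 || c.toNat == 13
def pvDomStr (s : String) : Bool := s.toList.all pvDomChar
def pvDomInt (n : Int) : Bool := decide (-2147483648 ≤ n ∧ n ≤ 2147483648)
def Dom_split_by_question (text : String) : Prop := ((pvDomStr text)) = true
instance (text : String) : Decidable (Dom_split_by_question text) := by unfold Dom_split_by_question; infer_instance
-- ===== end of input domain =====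

-- B is an equal-cost two-phase rewrite (filter lines, group at Q-headers, build each entry
-- from its whole group) of A's one-pass state machine; equivalence is proved on Pre_ (every
-- non-empty Q-line contains a colon — elsewhere the Python raises IndexError).

-- ===== PORT A =====
-- single pass; state = (questions dict, current_question (None or its key), current_text).
-- '(… .pyGet? 1).getD ""' : pyGet? is none exactly where Python raises IndexError (a Q-line
-- without colon) — those inputs are excluded by Pre_ below, the .getD "" value is never claimed.
def split_by_question (text : String) : List (String × String) :=
  let st := (((PySem.Str.split? text "\n").getD [])).foldl
    (fun (st : PySem.Dict String String × Option String × List String) line =>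
      if PySem.Str.strip line ≠ "" then                  -- if line.strip():
        if PySem.Str.startswith line "Q" then            -- if line.startswith("Q"):
          ((match st.2.1 with                            -- if current_question: questions[cq] = "\n".join(ct)
            | some q => if q ≠ "" then PySem.Dict.insert st.1 q (PySem.Str.join "\n" st.2.2) else st.1
            | none => st.1),
           some (PySem.Str.strip ((PySem.List.pyGet? (((PySem.Str.split? line ":").getD [])) 0).getD "")),
           [PySem.Str.strip ((PySem.List.pyGet? (((PySem.Str.split? line ":").getD [])) 1).getD "")])
        else (st.1, st.2.1, st.2.2 ++ [PySem.Str.strip line])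
      else st)
    ((PySem.Dict.empty : PySem.Dict String String), (none : Option String), ([] : List String))
  (match st.2.1 with                                     -- trailing: if current_question: …
   | some q => if q ≠ "" then PySem.Dict.insert st.1 q (PySem.Str.join "\n" st.2.2) else st.1
   | none => st.1).items

-- ===== PORT B =====
-- Source B's index scan 'i/j over lines': the inner 'while j … not startswith Q' is the takeWhile,
-- 'i = j' is the dropWhile, the leading 'i += 1; continue' lines are the else branch.
def splitB_groups : List String → List (String × List String)
  | [] => []
  | ln :: rest =>
    if PySem.Str.startswith ln "Q" then
      (ln, rest.takeWhile (fun l => !PySem.Str.startswith l "Q")) ::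
        splitB_groups (rest.dropWhile (fun l => !PySem.Str.startswith l "Q"))
    else splitB_groups rest
termination_by ls => ls.length
decreasing_by
  · have := List.length_dropWhile_le (p := fun l => !PySem.Str.startswith l "Q") (l := rest)
    simp at *; omega
  · simp

def split_by_question_alt (text : String) : List (String × String) :=
  let lines := (((PySem.Str.split? text "\n").getD [])).filter (fun l => decide (PySem.Str.strip l ≠ ""))
  ((splitB_groups lines).foldl
    (fun d g => PySem.Dict.insert d
        (PySem.Str.strip ((PySem.List.pyGet? (((PySem.Str.split? g.1 ":").getD [])) 0).getD ""))
        (PySem.Str.join "\n"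
          (PySem.Str.strip ((PySem.List.pyGet? (((PySem.Str.split? g.1 ":").getD [])) 1).getD "") ::
            g.2.map PySem.Str.strip)))
    PySem.Dict.empty).items

-- ===== PRECONDITION & SPEC =====
-- Pre_ excludes exactly the inputs where Python A raises IndexError: a line with non-empty strip
-- that starts with "Q" but contains no colon (the second split piece is out of range there).
def Pre_split_by_question (text : String) : Prop :=
  ∀ l ∈ ((PySem.Str.split? text "\n").getD []),
    PySem.Str.strip l ≠ "" → PySem.Str.startswith l "Q" = true →
      2 ≤ (((PySem.Str.split? l ":").getD [])).length
instance (text : String) : Decidable (Pre_split_by_question text) := by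
  unfold Pre_split_by_question; infer_instance
def pvWitness_split_by_question : String := "Q1: alpha\n  more text\n\nQ2: beta"
def Spec_split_by_question (text : String) (out : List (String × String)) : Prop := out = split_by_question_alt text
instance (text : String) (out : List (String × String)) : Decidable (Spec_split_by_question text out) := by unfold Spec_split_by_question; infer_instance

-- ===== CLAIM (what is proved, stated in full; the proofs are below) =====
def Claim_equal_split_by_question : Prop := ∀ (text : String), Dom_split_by_question text → Pre_split_by_question text → Spec_split_by_question text (split_by_question text)

-- ===== LEMMAS AND PROOFS =====

-- proof-side names for the two ports' loop bodies (definitionally equal to the inline lambdas)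
def qKey (l : String) : String :=
  PySem.Str.strip ((PySem.List.pyGet? (((PySem.Str.split? l ":").getD [])) 0).getD "")
def qVal (l : String) : String :=
  PySem.Str.strip ((PySem.List.pyGet? (((PySem.Str.split? l ":").getD [])) 1).getD "")
def stepA (st : PySem.Dict String String × Option String × List String) (line : String) :
    PySem.Dict String String × Option String × List String :=
  if PySem.Str.startswith line "Q" then
    ((match st.2.1 with
      | some q => if q ≠ "" then PySem.Dict.insert st.1 q (PySem.Str.join "\n" st.2.2) else st.1
      | none => st.1),
     some (qKey line), [qVal line])
  else (st.1, st.2.1, st.2.2 ++ [PySem.Str.strip line])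
def finishA (st : PySem.Dict String String × Option String × List String) :
    PySem.Dict String String :=
  match st.2.1 with
  | some q => if q ≠ "" then PySem.Dict.insert st.1 q (PySem.Str.join "\n" st.2.2) else st.1
  | none => st.1
def insG (d : PySem.Dict String String) (g : String × List String) : PySem.Dict String String :=
  PySem.Dict.insert d (qKey g.1) (PySem.Str.join "\n" (qVal g.1 :: g.2.map PySem.Str.strip))

-- shape of PySem.Chars.splitOn.go: the first emitted piece extends cur.reverse
lemma splitOn_go_shape (sep : List Char) :
    ∀ (fuel : Nat) (l cur : List Char) (acc : List (List Char)),
      ∃ s rest, PySem.Chars.splitOn.go sep fuel l cur acc =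
        acc.reverse ++ (cur.reverse ++ s) :: rest := by
  intro fuel
  induction fuel with
  | zero =>
    intro l cur acc
    exact ⟨l, [], by simp [PySem.Chars.splitOn.go]⟩
  | succ n ih =>
    intro l cur acc
    match l with
    | [] => exact ⟨[], [], by simp [PySem.Chars.splitOn.go]⟩
    | c :: rest =>
      rw [show PySem.Chars.splitOn.go sep (n+1) (c :: rest) cur acc =
          if sep.isPrefixOf (c :: rest) then
            PySem.Chars.splitOn.go sep n (List.drop sep.length (c :: rest)) [] (cur.reverse :: acc)
          else PySem.Chars.splitOn.go sep n rest (c :: cur) acc from by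
        simp [PySem.Chars.splitOn.go]]
      split
      · obtain ⟨s, r, hr⟩ := ih (List.drop sep.length (c :: rest)) [] (cur.reverse :: acc)
        exact ⟨[], s :: r, by simp [hr]⟩
      · obtain ⟨s, r, hr⟩ := ih rest (c :: cur) acc
        exact ⟨c :: s, r, by simp [hr]⟩

lemma splitOn_cons_head (c : Char) (t sep : List Char) (h : sep.isPrefixOf (c :: t) = false) :
    ∃ s rest, PySem.Chars.splitOn (c :: t) sep = (c :: s) :: rest := by
  unfold PySem.Chars.splitOn
  rw [show PySem.Chars.splitOn.go sep ((c :: t).length + 1) (c :: t) [] [] =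
      PySem.Chars.splitOn.go sep (c :: t).length t (c :: []) [] from by
    simp [PySem.Chars.splitOn.go, h]]
  obtain ⟨s, r, hr⟩ := splitOn_go_shape sep (c :: t).length t [c] []
  exact ⟨s, r, by simpa using hr⟩

lemma strip_cons_ne_nil (c : Char) (cs : List Char) (hc : PySem.Chars.isspace c = false) :
    PySem.Chars.strip (c :: cs) ≠ [] := by
  unfold PySem.Chars.strip PySem.Chars.lstrip PySem.Chars.rstrip
  rw [List.dropWhile_cons_of_neg (by simp [hc])]
  intro hcontra
  rw [List.reverse_eq_nil_iff, List.dropWhile_eq_nil_iff] at hcontra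
  have := hcontra c (by simp)
  simp [hc] at this

lemma qKey_ne (l : String) (h : PySem.Str.startswith l "Q" = true) : qKey l ≠ "" := by
  obtain ⟨t, ht⟩ : ∃ t, l.toList = 'Q' :: t := by
    have hs : PySem.Chars.startswith l.toList ['Q'] = true := by
      simpa [PySem.Str.startswith] using h
    obtain ⟨u, hu⟩ := (PySem.Chars.startswith_iff _ _).mp hs
    exact ⟨u, hu.symm⟩
  have hsplit : (PySem.Str.split? l ":").getD [] =
      (PySem.Chars.splitOn l.toList [':']).map String.ofList := by
    simp [PySem.Str.split?, PySem.Chars.split?]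
  obtain ⟨s, r, hr⟩ := splitOn_cons_head 'Q' t [':'] (by simp [List.isPrefixOf])
  unfold qKey
  rw [hsplit, ht, hr]
  simp only [List.map_cons]
  rw [show PySem.List.pyGet? (String.ofList ('Q' :: s) :: (r.map String.ofList)) 0
      = some (String.ofList ('Q' :: s)) from by simp [PySem.List.pyGet?, PySem.List.pyIdx?]]
  intro hcontra
  have h2 := congrArg String.toList hcontra
  simp [PySem.Str.strip] at h2
  exact strip_cons_ne_nil 'Q' s (by decide) h2

lemma main_open (ls : List String) (d : PySem.Dict String String) (q : String) (hq : q ≠ "")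
    (ct : List String) :
    finishA (ls.foldl stepA (d, some q, ct))
      = (splitB_groups (ls.dropWhile (fun l => !PySem.Str.startswith l "Q"))).foldl insG
          (PySem.Dict.insert d q (PySem.Str.join "\n"
            (ct ++ (ls.takeWhile (fun l => !PySem.Str.startswith l "Q")).map PySem.Str.strip))) := by
  induction ls generalizing d q ct with
  | nil => simp [finishA, splitB_groups, hq]
  | cons l t ih =>
    by_cases hQ : PySem.Str.startswith l "Q" = true
    · have hQ' : PySem.Chars.startswith l.toList ['Q'] = true := by
        simpa [PySem.Str.startswith] using hQ
      have hstep : stepA (d, some q, ct) l =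
          (PySem.Dict.insert d q (PySem.Str.join "\n" ct), some (qKey l), [qVal l]) := by
        simp [stepA, hQ', hq, qKey, qVal]
      rw [List.foldl_cons, hstep, ih _ _ (qKey_ne l hQ)]
      rw [show (l :: t).dropWhile (fun l => !PySem.Str.startswith l "Q") = l :: t from by
        simp [hQ']]
      rw [show (l :: t).takeWhile (fun l => !PySem.Str.startswith l "Q") = [] from by
        simp [hQ']]
      rw [show splitB_groups (l :: t)
          = (l, t.takeWhile (fun l => !PySem.Str.startswith l "Q")) ::
              splitB_groups (t.dropWhile (fun l => !PySem.Str.startswith l "Q")) from by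
        simp [splitB_groups, hQ']]
      simp [insG]
    · have hQ' : PySem.Chars.startswith l.toList ['Q'] = false := by
        simpa [PySem.Str.startswith] using eq_false_of_ne_true hQ
      have hstep : stepA (d, some q, ct) l = (d, some q, ct ++ [PySem.Str.strip l]) := by
        simp [stepA, hQ']
      rw [List.foldl_cons, hstep, ih _ _ hq]
      simp [hQ']

lemma main_none (ls : List String) (d : PySem.Dict String String) (ct : List String) :
    finishA (ls.foldl stepA (d, none, ct)) = (splitB_groups ls).foldl insG d := by
  induction ls generalizing d ct with
  | nil => simp [finishA, splitB_groups]
  | cons l t ih =>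
    by_cases hQ : PySem.Str.startswith l "Q" = true
    · have hQ' : PySem.Chars.startswith l.toList ['Q'] = true := by
        simpa [PySem.Str.startswith] using hQ
      have hstep : stepA (d, none, ct) l = (d, some (qKey l), [qVal l]) := by
        simp [stepA, hQ', qKey, qVal]
      rw [List.foldl_cons, hstep, main_open t d _ (qKey_ne l hQ)]
      rw [show splitB_groups (l :: t)
          = (l, t.takeWhile (fun l => !PySem.Str.startswith l "Q")) ::
              splitB_groups (t.dropWhile (fun l => !PySem.Str.startswith l "Q")) from by
        simp [splitB_groups, hQ']]
      simp [insG]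
    · have hQ' : PySem.Chars.startswith l.toList ['Q'] = false := by
        simpa [PySem.Str.startswith] using eq_false_of_ne_true hQ
      have hstep : stepA (d, none, ct) l = (d, none, ct ++ [PySem.Str.strip l]) := by
        simp [stepA, hQ']
      rw [List.foldl_cons, hstep, ih]
      rw [show splitB_groups (l :: t) = splitB_groups t from by simp [splitB_groups, hQ']]

-- ===== VERDICT (by name: the statement is the Claim_ definition above) =====
theorem split_by_question_spec : Claim_equal_split_by_question := by
  intro text _ _
  unfold Spec_split_by_question
  have hA : split_by_question text =
      (finishA ((((PySem.Str.split? text "\n").getD [])).foldl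
        (fun (st : PySem.Dict String String × Option String × List String) line => if PySem.Str.strip line ≠ "" then stepA st line else st)
        (PySem.Dict.empty, none, []))).items := rfl
  rw [hA, PySem.List.foldl_ite_eq_foldl_filter, main_none]
  rfl
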